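-- pv_equiv track=rewrite | github.com/Baztaab/Phoenix_Engine | phoenix_engine/vedic/calculations/gochar.py | _get_functional_nature
-- ===== SOURCE A (Python) =====
-- def _get_functional_nature(planet_name: str, asc_sign: int) -> str:
--     rulers = {1:"Mars", 2:"Venus", 3:"Mercury", 4:"Moon", 5:"Sun", 6:"Mercury",
--               7:"Venus", 8:"Mars", 9:"Jupiter", 10:"Saturn", 11:"Saturn", 12:"Jupiter"}
--
--     owned_houses = []
--     for h in range(1, 13):
--         sign = (asc_sign + h - 2) % 12 + 1
--         if rulers.get(sign) == planet_name:
--             owned_houses.append(h)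
--
--     if not owned_houses:
--         return "Neutral"
--
--     is_trine_lord = any(h in [1, 5, 9] for h in owned_houses)
--     is_dusthana_lord = any(h in [6, 8, 12] for h in owned_houses)
--
--     if is_trine_lord:
--         return "Functional Benefic"
--     if is_dusthana_lord and not is_trine_lord:
--         return "Functional Malefic"
--     return "Neutral/Mixed"
-- ===== SOURCE B (Python) =====
-- _OWNED_SIGNS = {"Mars": [1, 8], "Venus": [2, 7], "Mercury": [3, 6], "Moon": [4],
--                 "Sun": [5], "Jupiter": [9, 12], "Saturn": [10, 11]}
--
-- def _get_functional_nature(planet_name: str, asc_sign: int) -> str: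
--     owned_houses = [(s - asc_sign) % 12 + 1 for s in _OWNED_SIGNS.get(planet_name, [])]
--     if not owned_houses:
--         return "Neutral"
--     if any(h in (1, 5, 9) for h in owned_houses):
--         return "Functional Benefic"
--     if any(h in (6, 8, 12) for h in owned_houses):
--         return "Functional Malefic"
--     return "Neutral/Mixed"
-- ===== Notes on version B (the rewrite author's own statement) =====
-- stated objective: simpler
-- what changed: B replaces A's loop over all 12 houses (computing each house's sign and consulting a sign->ruler dict) with a direct lookup of the planet's ruled signs in an inverted planet->signs map, mapping each owned sign to its house via the modular inverse (s - asc_sign) % 12 + 1.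
import Mathlib
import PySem

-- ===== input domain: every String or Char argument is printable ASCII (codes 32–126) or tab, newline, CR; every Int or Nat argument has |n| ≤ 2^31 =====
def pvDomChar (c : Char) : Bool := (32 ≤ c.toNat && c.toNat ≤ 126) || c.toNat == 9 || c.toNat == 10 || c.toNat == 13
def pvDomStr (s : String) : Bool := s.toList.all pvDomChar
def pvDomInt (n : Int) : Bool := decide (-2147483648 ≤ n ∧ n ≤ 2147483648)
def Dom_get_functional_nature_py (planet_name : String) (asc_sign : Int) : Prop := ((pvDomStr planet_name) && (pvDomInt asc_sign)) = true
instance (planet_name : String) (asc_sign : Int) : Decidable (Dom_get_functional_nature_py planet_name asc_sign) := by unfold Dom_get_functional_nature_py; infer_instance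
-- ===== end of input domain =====

-- B replaces A's scan of all 12 houses with a lookup of the planet's own ruled signs (at most two), mapping each to its house; objective: simpler.

-- ===== PORT A =====
def pvRulers : PySem.Dict Int String :=
  PySem.Dict.ofList [(1,"Mars"),(2,"Venus"),(3,"Mercury"),(4,"Moon"),(5,"Sun"),(6,"Mercury"),
                     (7,"Venus"),(8,"Mars"),(9,"Jupiter"),(10,"Saturn"),(11,"Saturn"),(12,"Jupiter")]

def get_functional_nature_py (planet_name : String) (asc_sign : Int) : String :=
  let owned_houses : List Int := (PySem.List.pyRange 1 13 1).foldl (fun acc h =>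
      let sign := PySem.Int.mod (asc_sign + h - 2) 12 + 1
      if PySem.Dict.get? pvRulers sign == some planet_name then acc ++ [h] else acc) []
  if owned_houses = [] then "Neutral"
  else
    let is_trine_lord := owned_houses.any (fun h => ([1,5,9] : List Int).contains h)
    let is_dusthana_lord := owned_houses.any (fun h => ([6,8,12] : List Int).contains h)
    if is_trine_lord then "Functional Benefic"
    else if is_dusthana_lord && !is_trine_lord then "Functional Malefic"
    else "Neutral/Mixed"

-- ===== PORT B =====
def pvOwnedSigns : PySem.Dict String (List Int) :=
  PySem.Dict.ofList [("Mars",[1,8]),("Venus",[2,7]),("Mercury",[3,6]),("Moon",[4]),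
                     ("Sun",[5]),("Jupiter",[9,12]),("Saturn",[10,11])]

def get_functional_nature_py_alt (planet_name : String) (asc_sign : Int) : String :=
  let owned_houses : List Int :=
    (PySem.Dict.getD pvOwnedSigns planet_name []).map (fun s => PySem.Int.mod (s - asc_sign) 12 + 1)
  if owned_houses = [] then "Neutral"
  else if owned_houses.any (fun h => ([1,5,9] : List Int).contains h) then "Functional Benefic"
  else if owned_houses.any (fun h => ([6,8,12] : List Int).contains h) then "Functional Malefic"
  else "Neutral/Mixed"

-- ===== PRECONDITION & SPEC =====
def Spec_get_functional_nature_py (planet_name : String) (asc_sign : Int) (out : String) : Prop := out = get_functional_nature_py_alt planet_name asc_sign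
instance (planet_name : String) (asc_sign : Int) (out : String) : Decidable (Spec_get_functional_nature_py planet_name asc_sign out) := by unfold Spec_get_functional_nature_py; infer_instance

-- ===== CLAIM (what is proved, stated in full; the proofs are below) =====
def Claim_equal_get_functional_nature_py : Prop := ∀ (planet_name : String) (asc_sign : Int), Dom_get_functional_nature_py planet_name asc_sign → Spec_get_functional_nature_py planet_name asc_sign (get_functional_nature_py planet_name asc_sign)

-- ===== LEMMAS AND PROOFS =====

-- Both programs depend on asc_sign only through its residue mod 12.
theorem pv_mod_idem (a : Int) : PySem.Int.mod (PySem.Int.mod a 12) 12 = PySem.Int.mod a 12 := by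
  rw [PySem.Int.mod_eq_emod_of_pos (by norm_num), PySem.Int.mod_eq_emod_of_pos (by norm_num)]
  omega

theorem pv_mod_shiftA (a b h : Int) (hab : PySem.Int.mod a 12 = PySem.Int.mod b 12) :
    PySem.Int.mod (a + h - 2) 12 = PySem.Int.mod (b + h - 2) 12 := by
  rw [PySem.Int.mod_eq_emod_of_pos (by norm_num), PySem.Int.mod_eq_emod_of_pos (by norm_num)]
  rw [PySem.Int.mod_eq_emod_of_pos (by norm_num), PySem.Int.mod_eq_emod_of_pos (by norm_num)] at hab
  omega

theorem pv_mod_shiftB (a b s : Int) (hab : PySem.Int.mod a 12 = PySem.Int.mod b 12) :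
    PySem.Int.mod (s - a) 12 = PySem.Int.mod (s - b) 12 := by
  rw [PySem.Int.mod_eq_emod_of_pos (by norm_num), PySem.Int.mod_eq_emod_of_pos (by norm_num)]
  rw [PySem.Int.mod_eq_emod_of_pos (by norm_num), PySem.Int.mod_eq_emod_of_pos (by norm_num)] at hab
  omega

theorem pv_periodA (p : String) (a b : Int) (hab : PySem.Int.mod a 12 = PySem.Int.mod b 12) :
    get_functional_nature_py p a = get_functional_nature_py p b := by
  unfold get_functional_nature_py
  have hf : (fun (acc : List Int) (h : Int) =>
      if PySem.Dict.get? pvRulers (PySem.Int.mod (a + h - 2) 12 + 1) == some p then acc ++ [h] else acc)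
      = (fun (acc : List Int) (h : Int) =>
      if PySem.Dict.get? pvRulers (PySem.Int.mod (b + h - 2) 12 + 1) == some p then acc ++ [h] else acc) := by
    funext acc h
    rw [pv_mod_shiftA a b h hab]
  rw [hf]

theorem pv_periodB (p : String) (a b : Int) (hab : PySem.Int.mod a 12 = PySem.Int.mod b 12) :
    get_functional_nature_py_alt p a = get_functional_nature_py_alt p b := by
  unfold get_functional_nature_py_alt
  have hf : (fun (s : Int) => PySem.Int.mod (s - a) 12 + 1)
      = (fun (s : Int) => PySem.Int.mod (s - b) 12 + 1) := by
    funext s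
    rw [pv_mod_shiftB a b s hab]
  rw [hf]

-- On a planet name that rules no sign, both programs return "Neutral".
theorem pvRulers_eq : pvRulers = PySem.Dict.mk [(1,"Mars"),(2,"Venus"),(3,"Mercury"),(4,"Moon"),(5,"Sun"),(6,"Mercury"),
    (7,"Venus"),(8,"Mars"),(9,"Jupiter"),(10,"Saturn"),(11,"Saturn"),(12,"Jupiter")] := by decide

theorem pvOwnedSigns_eq : pvOwnedSigns = PySem.Dict.mk [("Mars",[1,8]),("Venus",[2,7]),("Mercury",[3,6]),("Moon",[4]),
    ("Sun",[5]),("Jupiter",[9,12]),("Saturn",[10,11])] := by decide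

theorem pv_neutralA (p : String) (a : Int)
    (h1 : p ≠ "Mars") (h2 : p ≠ "Venus") (h3 : p ≠ "Mercury") (h4 : p ≠ "Moon")
    (h5 : p ≠ "Sun") (h6 : p ≠ "Jupiter") (h7 : p ≠ "Saturn") :
    get_functional_nature_py p a = "Neutral" := by
  have hcond : ∀ s : Int, (PySem.Dict.get? pvRulers s == some p) = false := by
    intro s
    cases hfind : PySem.Dict.get? pvRulers s with
    | none => simp
    | some n =>
      have hmem : (s, n) ∈ pvRulers.items := by exact PySem.Dict.mem_items_of_get?_eq_some _ hfind
      rw [pvRulers_eq] at hmem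
      simp [Prod.ext_iff] at hmem
      rcases hmem with ⟨_,h⟩|⟨_,h⟩|⟨_,h⟩|⟨_,h⟩|⟨_,h⟩|⟨_,h⟩|⟨_,h⟩|⟨_,h⟩|⟨_,h⟩|⟨_,h⟩|⟨_,h⟩|⟨_,h⟩ <;> subst h <;>
        simp [Ne.symm h1, Ne.symm h2, Ne.symm h3, Ne.symm h4, Ne.symm h5, Ne.symm h6, Ne.symm h7]
  unfold get_functional_nature_py
  simp only [hcond, Bool.false_eq_true, if_false]
  simp

theorem pv_neutralB (p : String) (a : Int)
    (h1 : p ≠ "Mars") (h2 : p ≠ "Venus") (h3 : p ≠ "Mercury") (h4 : p ≠ "Moon")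
    (h5 : p ≠ "Sun") (h6 : p ≠ "Jupiter") (h7 : p ≠ "Saturn") :
    get_functional_nature_py_alt p a = "Neutral" := by
  unfold get_functional_nature_py_alt
  rw [pvOwnedSigns_eq]
  simp [PySem.Dict.getD, PySem.Dict.get?,
        Ne.symm h1, Ne.symm h2, Ne.symm h3, Ne.symm h4, Ne.symm h5, Ne.symm h6, Ne.symm h7]

theorem pv_string_cases (p : String) :
    p = "Mars" ∨ p = "Venus" ∨ p = "Mercury" ∨ p = "Moon" ∨ p = "Sun" ∨ p = "Jupiter" ∨ p = "Saturn" ∨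
    (p ≠ "Mars" ∧ p ≠ "Venus" ∧ p ≠ "Mercury" ∧ p ≠ "Moon" ∧ p ≠ "Sun" ∧ p ≠ "Jupiter" ∧ p ≠ "Saturn") := by
  by_cases h1 : p = "Mars"; · exact Or.inl h1
  by_cases h2 : p = "Venus"; · exact Or.inr (Or.inl h2)
  by_cases h3 : p = "Mercury"; · exact Or.inr (Or.inr (Or.inl h3))
  by_cases h4 : p = "Moon"; · exact Or.inr (Or.inr (Or.inr (Or.inl h4)))
  by_cases h5 : p = "Sun"; · exact Or.inr (Or.inr (Or.inr (Or.inr (Or.inl h5))))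
  by_cases h6 : p = "Jupiter"; · exact Or.inr (Or.inr (Or.inr (Or.inr (Or.inr (Or.inl h6)))))
  by_cases h7 : p = "Saturn"; · exact Or.inr (Or.inr (Or.inr (Or.inr (Or.inr (Or.inr (Or.inl h7))))))
  exact Or.inr (Or.inr (Or.inr (Or.inr (Or.inr (Or.inr (Or.inr ⟨h1,h2,h3,h4,h5,h6,h7⟩))))))

-- ===== VERDICT (by name: the statement is the Claim_ definition above) =====
theorem get_functional_nature_py_spec : Claim_equal_get_functional_nature_py := by
  intro p a _
  unfold Spec_get_functional_nature_py
  have hab : PySem.Int.mod a 12 = PySem.Int.mod (PySem.Int.mod a 12) 12 := (pv_mod_idem a).symm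
  rw [pv_periodA p a _ hab, pv_periodB p a _ hab]
  have hr0 : 0 ≤ PySem.Int.mod a 12 := PySem.Int.mod_nonneg a (by norm_num)
  have hr1 : PySem.Int.mod a 12 < 12 := PySem.Int.mod_lt a (by norm_num)
  rcases pv_string_cases p with h|h|h|h|h|h|h|h
  case inr.inr.inr.inr.inr.inr.inr =>
    obtain ⟨h1,h2,h3,h4,h5,h6,h7⟩ := h
    rw [pv_neutralA p _ h1 h2 h3 h4 h5 h6 h7, pv_neutralB p _ h1 h2 h3 h4 h5 h6 h7]
  all_goals
    subst h
  all_goals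
    rcases (by omega : PySem.Int.mod a 12 = 0 ∨ PySem.Int.mod a 12 = 1 ∨ PySem.Int.mod a 12 = 2 ∨
        PySem.Int.mod a 12 = 3 ∨ PySem.Int.mod a 12 = 4 ∨ PySem.Int.mod a 12 = 5 ∨ PySem.Int.mod a 12 = 6 ∨
        PySem.Int.mod a 12 = 7 ∨ PySem.Int.mod a 12 = 8 ∨ PySem.Int.mod a 12 = 9 ∨ PySem.Int.mod a 12 = 10 ∨
        PySem.Int.mod a 12 = 11) with h|h|h|h|h|h|h|h|h|h|h|h <;> rw [h] <;> decide
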